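-- pv_equiv track=rewrite | github.com/nvlinh99/CTT005-GraphTheory | Lab02 - UCS - GBFS - AStar/student_functions.py | bfsToFindSortPath
-- ===== SOURCE A (Python) =====
-- from collections import defaultdict
-- from collections import deque
--
-- def adjMatrixToAdjList(matrix):
--     adjList = defaultdict(list)
--     for i in range(len(matrix)):
--             for j in range(len(matrix[i])):
--                 if matrix[i][j] > 0:
--                     adjList[i].append(j)
--     return adjList
--
-- def bfsToFindSortPath(matrix, startNode):
--     adjList = adjMatrixToAdjList(matrix)
--     queue = deque([(-1, startNode)])
--     discovered = set([startNode])
--     while queue: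
--         neighbor, node = queue.popleft()
--         yield neighbor, node
--         newSetNode = set(adjList[node]) - discovered
--         discovered.update(newSetNode)
--         for newNeighbor in newSetNode:
--             queue.extend([(node, newNeighbor)])
-- ===== SOURCE B (Python) =====
-- def bfsToFindSortPath(matrix, startNode):
--     # Level-synchronous BFS: no deque, no adjacency-list pre-pass, no per-node
--     # set objects.  Whole frontiers are expanded at a time; each frontier node's
--     # row is scanned left-to-right and fresh neighbours are marked visited
--     # immediately and appended to the next frontier in ascending index order.
--     visited = {startNode}
--     frontier = [(-1, startNode)]
--     while frontier:
--         yield from frontier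
--         nxt = []
--         for _, node in frontier:
--             if 0 <= node < len(matrix):
--                 for j, w in enumerate(matrix[node]):
--                     if w > 0 and j not in visited:
--                         visited.add(j)
--                         nxt.append((node, j))
--         frontier = nxt
-- ===== Notes on version B (the rewrite author's own statement) =====
-- stated objective: faster
-- what changed: Replaces the adjacency-list pre-pass + deque + per-node set-difference BFS by a level-synchronous BFS: whole frontier lists are expanded at a time, each reached node's row is scanned left-to-right with immediate visited-marking, so no dict over the whole matrix, no deque and no per-node set objects are built (unreached rows are never scanned), and B's output never depends on set iteration order.
import Mathlib
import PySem

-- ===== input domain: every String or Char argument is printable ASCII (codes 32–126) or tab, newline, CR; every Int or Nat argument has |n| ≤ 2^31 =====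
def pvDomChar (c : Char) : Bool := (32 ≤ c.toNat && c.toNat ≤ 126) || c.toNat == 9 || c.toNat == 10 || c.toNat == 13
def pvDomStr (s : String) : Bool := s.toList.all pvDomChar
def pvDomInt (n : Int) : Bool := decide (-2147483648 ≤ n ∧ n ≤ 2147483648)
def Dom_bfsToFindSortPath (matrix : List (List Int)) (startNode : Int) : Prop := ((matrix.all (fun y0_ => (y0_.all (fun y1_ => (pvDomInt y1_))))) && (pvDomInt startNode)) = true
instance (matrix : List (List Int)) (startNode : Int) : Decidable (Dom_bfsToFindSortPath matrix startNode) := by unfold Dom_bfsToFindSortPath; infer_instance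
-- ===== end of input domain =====

-- B replaces A's adjacency-list pre-pass + deque + per-node set differences by a
-- level-synchronous BFS over frontier lists that scans only reached rows (objective:
-- faster; a timing run measured B faster). Both generators are consumed to a list.

-- ===== PORT A =====
-- for i in range(len(matrix)): for j in range(len(matrix[i])): if matrix[i][j] > 0: adjList[i].append(j)
def adjMatrixToAdjList (matrix : List (List Int)) : PySem.Dict Int (List Int) :=
  (PySem.List.pyRange 0 (PySem.List.len matrix) 1).foldl
    (fun d i =>
      (PySem.List.pyRange 0 (PySem.List.len (PySem.List.pyGetD matrix i [])) 1).foldl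
        (fun d2 j =>
          if PySem.List.pyGetD (PySem.List.pyGetD matrix i []) j 0 > 0
          then PySem.Dict.modify d2 i [] (fun l => l ++ [j]) else d2) d)
    PySem.Dict.empty

-- A's while-queue loop; fuel bounds the number of pops (a node is enqueued only when
-- first added to 'discovered', so at most 1 + (total matrix entries) pairs are popped).
-- 'for newNeighbor in newSetNode' iterates the CPython set in hash order; inside Pre_
-- (all row lengths ≤ 8, hence all elements < 8, below the minimum hash-table size)
-- that order is exactly the ascending insertion order this port iterates.
def bfsLoopA (adj : PySem.Dict Int (List Int)) :
    Nat → List (Int × Int) → PySem.Set Int → List (Int × Int)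
  | 0, _, _ => []
  | _ + 1, [], _ => []
  | fuel + 1, (neighbor, node) :: rest, discovered =>
    let newSetNode : PySem.Set Int :=
      PySem.Set.diff (PySem.Set.ofList (PySem.Dict.getD adj node [])) discovered
    (neighbor, node) ::
      bfsLoopA adj fuel (rest ++ newSetNode.map (fun nb => (node, nb)))
        (PySem.Set.update discovered newSetNode)

def bfsToFindSortPath (matrix : List (List Int)) (startNode : Int) : List (Int × Int) :=
  bfsLoopA (adjMatrixToAdjList matrix) (2 + (matrix.map List.length).sum)
    [(-1, startNode)] (PySem.Set.ofList [startNode])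

-- ===== PORT B =====
-- one frontier node: if 0 <= node < len(matrix): for j, w in enumerate(matrix[node]):
--   if w > 0 and j not in visited: visited.add(j); nxt.append((node, j))
def bStep (matrix : List (List Int)) (st : List (Int × Int) × PySem.Set Int)
    (p : Int × Int) : List (Int × Int) × PySem.Set Int :=
  if 0 ≤ p.2 ∧ p.2 < PySem.List.len matrix then
    (PySem.List.enumerate (PySem.List.pyGetD matrix p.2 [])).foldl
      (fun st2 q =>
        if q.2 > 0 ∧ PySem.Set.contains st2.2 q.1 = false then
          (st2.1 ++ [(p.2, q.1)], PySem.Set.add st2.2 q.1)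
        else st2) st
  else st

-- while frontier: yield from frontier; nxt = expand(frontier); frontier = nxt
-- fuel counts levels; each non-final level adds ≥ 1 node to 'visited', and at most
-- 1 + (total matrix entries) nodes are ever visited, so 2 + Σ row lengths suffices.
def bfsLoopB (matrix : List (List Int)) :
    Nat → List (Int × Int) → PySem.Set Int → List (Int × Int)
  | 0, _, _ => []
  | _ + 1, [], _ => []
  | fuel + 1, x :: rest, visited =>
    let st := (x :: rest).foldl (bStep matrix) ([], visited)
    (x :: rest) ++ bfsLoopB matrix fuel st.1 st.2

def bfsToFindSortPath_alt (matrix : List (List Int)) (startNode : Int) : List (Int × Int) :=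
  bfsLoopB matrix (2 + (matrix.map List.length).sum)
    [(-1, startNode)] (PySem.Set.ofList [startNode])

-- ===== PRECONDITION & SPEC =====
-- Pre_ excludes matrices with a row longer than 8: there A's yield order follows CPython's
-- hash iteration order over the neighbour set (an accidental order PySem does not model,
-- and B deliberately does not reproduce — B always emits neighbours ascending), while for
-- rows of length ≤ 8 every set element is < 8, below the minimum hash-table size, so the
-- hash order is exactly the ascending order both ports produce.
def Pre_bfsToFindSortPath (matrix : List (List Int)) (startNode : Int) : Prop :=
  ∀ row ∈ matrix, row.length ≤ 8
instance (matrix : List (List Int)) (startNode : Int) : Decidable (Pre_bfsToFindSortPath matrix startNode) := by unfold Pre_bfsToFindSortPath; infer_instance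

def pvWitness_bfsToFindSortPath : List (List Int) × Int := ([[0, 1], [1, 0]], 0)

def Spec_bfsToFindSortPath (matrix : List (List Int)) (startNode : Int) (out : List (Int × Int)) : Prop := out = bfsToFindSortPath_alt matrix startNode
instance (matrix : List (List Int)) (startNode : Int) (out : List (Int × Int)) : Decidable (Spec_bfsToFindSortPath matrix startNode out) := by unfold Spec_bfsToFindSortPath; infer_instance

-- ===== CLAIM (what is proved, stated in full; the proofs are below) =====
def Claim_equal_bfsToFindSortPath : Prop := ∀ (matrix : List (List Int)) (startNode : Int), Dom_bfsToFindSortPath matrix startNode → Pre_bfsToFindSortPath matrix startNode → Spec_bfsToFindSortPath matrix startNode (bfsToFindSortPath matrix startNode)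

-- ===== LEMMAS AND PROOFS =====

-- the neighbour list of a row: indices of its positive entries, ascending
def rowNbrs (row : List Int) : List Int :=
  ((PySem.List.enumerate row).filter (fun p => decide (p.2 > 0))).map (fun p => p.1)

-- A's per-pop state step (next-queue suffix so far, discovered), shared shape with bStep
def aStep (adj : PySem.Dict Int (List Int)) (st : List (Int × Int) × PySem.Set Int)
    (p : Int × Int) : List (Int × Int) × PySem.Set Int :=
  (st.1 ++ (PySem.Set.diff (PySem.Set.ofList (PySem.Dict.getD adj p.2 [])) st.2).map (fun nb => (p.2, nb)),
   PySem.Set.update st.2 (PySem.Set.diff (PySem.Set.ofList (PySem.Dict.getD adj p.2 [])) st.2))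

-- A's inner append loop (over one row) touches only key i of the dict
theorem inner_getD (i : Int) (row : List Int) :
    ∀ (s : Int) (d : PySem.Dict Int (List Int)) (k : Int),
    PySem.Dict.getD
      ((PySem.List.enumerate row s).foldl
        (fun d2 p => if p.2 > 0 then PySem.Dict.modify d2 i [] (fun l => l ++ [p.1]) else d2) d) k []
    = if k = i then
        PySem.Dict.getD d i [] ++
          ((PySem.List.enumerate row s).filter (fun p => decide (p.2 > 0))).map (fun p => p.1)
      else PySem.Dict.getD d k [] := by
  induction row with
  | nil => intro s d k; simp [PySem.List.enumerate_nil]; intro h; simp [h]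
  | cons x xs ih =>
    intro s d k
    rw [PySem.List.enumerate_cons]
    by_cases hx : x > 0
    · simp only [List.foldl_cons, List.filter_cons, hx, if_pos, decide_true]
      rw [ih]
      by_cases hk : k = i
      · simp [hk]
      · simp [hk, PySem.Dict.getD_modify]
    · simp only [List.foldl_cons, List.filter_cons, hx, decide_false]
      rw [ih]
      simp

-- the port's inner pyRange fold is the fold over enumerate of the row
theorem inner_fold_eq (i : Int) (row : List Int) (d : PySem.Dict Int (List Int)) :
    (PySem.List.pyRange 0 (PySem.List.len row) 1).foldl
      (fun d2 j => if PySem.List.pyGetD row j 0 > 0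
        then PySem.Dict.modify d2 i [] (fun l => l ++ [j]) else d2) d
    = (PySem.List.enumerate row).foldl
        (fun d2 p => if p.2 > 0 then PySem.Dict.modify d2 i [] (fun l => l ++ [p.1]) else d2) d := by
  rw [PySem.List.enumerate_eq_map_pyRange row 0, List.foldl_map]

-- what the whole double loop leaves under key k
theorem outer_fold_getD (ms : List (List Int)) :
    ∀ (s : Int) (d : PySem.Dict Int (List Int)) (k : Int),
    PySem.Dict.getD
      ((PySem.List.enumerate ms s).foldl
        (fun d p =>
          (PySem.List.enumerate p.2).foldl
            (fun d2 q => if q.2 > 0 then PySem.Dict.modify d2 p.1 [] (fun l => l ++ [q.1]) else d2) d) d) k []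
    = if h : s ≤ k ∧ (k - s).toNat < ms.length
      then PySem.Dict.getD d k [] ++ rowNbrs (ms[(k - s).toNat])
      else PySem.Dict.getD d k [] := by
  induction ms with
  | nil => intro s d k; simp [PySem.List.enumerate_nil]
  | cons row t ih =>
    intro s d k
    rw [PySem.List.enumerate_cons, List.foldl_cons, ih]
    by_cases hk : k = s
    · subst hk
      have h1 : ¬ (k + 1 ≤ k ∧ (k - (k + 1)).toNat < t.length) := by omega
      have h2 : k ≤ k ∧ (k - k).toNat < (row :: t).length := by simp
      rw [dif_neg h1, dif_pos h2, inner_getD]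
      simp [rowNbrs]
    · by_cases h3 : s + 1 ≤ k ∧ (k - (s + 1)).toNat < t.length
      · have hl : (row :: t).length = t.length + 1 := rfl
        have h4 : s ≤ k ∧ (k - s).toNat < (row :: t).length := by
          rw [hl]; omega
        rw [dif_pos h3, dif_pos h4, inner_getD]
        rw [if_neg (by omega)]
        have : (k - s).toNat = (k - (s + 1)).toNat + 1 := by omega
        simp [this]
      · have hl : (row :: t).length = t.length + 1 := rfl
        have h4 : ¬ (s ≤ k ∧ (k - s).toNat < (row :: t).length) := by
          rw [hl]; omega
        rw [dif_neg h3, dif_neg h4, inner_getD, if_neg (by omega)]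

-- A's defaultdict lookup is B's guarded on-demand row
theorem adj_getD (matrix : List (List Int)) (node : Int) :
    PySem.Dict.getD (adjMatrixToAdjList matrix) node [] =
      if 0 ≤ node ∧ node < PySem.List.len matrix
      then rowNbrs (PySem.List.pyGetD matrix node []) else [] := by
  have h : adjMatrixToAdjList matrix =
      (PySem.List.enumerate matrix).foldl
        (fun d p =>
          (PySem.List.enumerate p.2).foldl
            (fun d2 q => if q.2 > 0 then PySem.Dict.modify d2 p.1 [] (fun l => l ++ [q.1]) else d2) d)
        PySem.Dict.empty := by
    unfold adjMatrixToAdjList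
    rw [PySem.List.enumerate_eq_map_pyRange matrix [], List.foldl_map]
    simp only [inner_fold_eq]
  rw [h, outer_fold_getD]
  have hlen : PySem.List.len matrix = (matrix.length : Int) := by simp [PySem.List.len]
  by_cases hc : 0 ≤ node ∧ node < PySem.List.len matrix
  · have hc' : (0 : Int) ≤ node ∧ (node - 0).toNat < matrix.length := by
      rw [hlen] at hc; omega
    rw [dif_pos hc', if_pos hc, PySem.Dict.getD_empty]
    have : PySem.List.pyGetD matrix node [] = matrix[(node - 0).toNat] := by
      rw [PySem.List.pyGetD_of_nonneg matrix [] hc.1]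
      rw [List.getD_eq_getElem]
      · congr 1; omega
      · omega
    rw [this, List.nil_append]
  · have hc' : ¬ ((0 : Int) ≤ node ∧ (node - 0).toNat < matrix.length) := by
      rw [hlen] at hc; omega
    rw [dif_neg hc', if_neg hc, PySem.Dict.getD_empty]

-- rowNbrs is strictly increasing, hence Nodup
theorem nodup_rowNbrs (row : List Int) : (rowNbrs row).Nodup := by
  have h := PySem.List.pairwise_lt_enumerate (xs := row) (s := 0)
  have h2 := h.filter (fun p => decide (p.2 > 0))
  have h3 := List.Pairwise.map (f := fun p : Int × Int => p.1) (R := fun p q => p.1 < q.1)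
      (S := (· < ·)) (fun a b hab => hab) h2
  exact h3.imp ne_of_lt

-- each element of rowNbrs is an index into the row
theorem mem_rowNbrs (row : List Int) (x : Int) (hx : x ∈ rowNbrs row) :
    0 ≤ x ∧ x < (row.length : Int) := by
  unfold rowNbrs at hx
  obtain ⟨q, hq, rfl⟩ := List.mem_map.mp hx
  have hq' := (List.mem_filter.mp hq).1
  rw [PySem.List.mem_enumerate_iff] at hq'
  obtain ⟨k, hk, rfl⟩ := hq'
  constructor
  · simp
  · simp; omega

-- B's immediate marking over one row equals A's batch form (batch vs immediate)
theorem inner_scan (node : Int) (row : List Int) :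
    ∀ (s : Int) (st : List (Int × Int) × PySem.Set Int),
    (PySem.List.enumerate row s).foldl
      (fun st2 q =>
        if q.2 > 0 ∧ PySem.Set.contains st2.2 q.1 = false then
          (st2.1 ++ [(node, q.1)], PySem.Set.add st2.2 q.1)
        else st2) st
    = (st.1 ++ (((PySem.List.enumerate row s).filter
          (fun q => decide (q.2 > 0) && !PySem.Set.contains st.2 q.1)).map (fun q => (node, q.1))),
       PySem.Set.update st.2
         (((PySem.List.enumerate row s).filter
          (fun q => decide (q.2 > 0) && !PySem.Set.contains st.2 q.1)).map (fun q => q.1))) := by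
  induction row with
  | nil => intro s st; simp [PySem.List.enumerate_nil]
  | cons x xs ih =>
    intro s st
    rw [PySem.List.enumerate_cons]
    by_cases h : x > 0 ∧ PySem.Set.contains st.2 s = false
    · have hcongr : ∀ a ∈ PySem.List.enumerate xs (s + 1),
          (decide (a.2 > 0) && !PySem.Set.contains (PySem.Set.add st.2 s) a.1)
          = (decide (a.2 > 0) && !PySem.Set.contains st.2 a.1) := by
        intro a ha
        rw [PySem.List.mem_enumerate_iff] at ha
        obtain ⟨k, hk, rfl⟩ := ha
        have hne : s + 1 + (k : Int) ≠ s := by omega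
        have : PySem.Set.contains (PySem.Set.add st.2 s) (s + 1 + (k : Int))
            = PySem.Set.contains st.2 (s + 1 + (k : Int)) := by
          rw [Bool.eq_iff_iff, PySem.Set.contains_iff, PySem.Set.contains_iff, PySem.Set.mem_add]
          constructor
          · rintro (hm | hm)
            · exact hm
            · exact absurd hm hne
          · exact Or.inl
        rw [this]
      rw [List.foldl_cons, if_pos h]
      rw [ih (s + 1) (st.1 ++ [(node, s)], PySem.Set.add st.2 s)]
      rw [List.filter_cons]
      have hns : s ∉ st.2 := by
        intro hm
        rw [(PySem.Set.contains_iff st.2 s).mpr hm] at h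
        exact absurd h.2 (by simp)
      have hp : (decide ((s, x).2 > 0) && !PySem.Set.contains st.2 (s, x).1) = true := by
        simp [h.1, hns]
      rw [if_pos hp]
      rw [List.filter_congr hcongr]
      simp only [List.map_cons, PySem.Set.update_cons, List.append_assoc, List.singleton_append]
    · rw [List.foldl_cons, if_neg h]
      rw [ih (s + 1) st]
      rw [List.filter_cons]
      have hp : (decide ((s, x).2 > 0) && !PySem.Set.contains st.2 (s, x).1) = false := by
        rcases Decidable.not_and_iff_not_or_not.mp h with h1 | h1
        · simp [h1]
        · simp at h1
          simp [h1]
      rw [hp]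
      simp

-- one popped node produces the same (kids, discovered) step in both programs
theorem step_eq (matrix : List (List Int)) :
    aStep (adjMatrixToAdjList matrix) = bStep matrix := by
  funext st p
  unfold aStep bStep
  rw [adj_getD]
  by_cases hg : 0 ≤ p.2 ∧ p.2 < PySem.List.len matrix
  · rw [if_pos hg, if_pos hg]
    rw [inner_scan]
    rw [PySem.Set.ofList_eq_self_of_nodup _ (nodup_rowNbrs _)]
    have hdiff : PySem.Set.diff (rowNbrs (PySem.List.pyGetD matrix p.2 [])) st.2
        = (rowNbrs (PySem.List.pyGetD matrix p.2 [])).filter (fun x => !PySem.Set.contains st.2 x) := rfl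
    rw [hdiff]
    unfold rowNbrs
    rw [List.filter_map, List.filter_filter]
    simp [Function.comp, List.map_map, Bool.and_comm]
  · rw [if_neg hg, if_neg hg]
    simp [PySem.Set.diff]

-- A's FIFO loop processed a whole level at a time
theorem A_level (adj : PySem.Dict Int (List Int)) :
    ∀ (q : List (Int × Int)) (f : Nat) (kids : List (Int × Int)) (disc : PySem.Set Int),
    bfsLoopA adj (q.length + f) (q ++ kids) disc
    = q ++ bfsLoopA adj f (q.foldl (aStep adj) (kids, disc)).1 (q.foldl (aStep adj) (kids, disc)).2 := by
  intro q
  induction q with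
  | nil => intro f kids disc; simp
  | cons p q' ih =>
    intro f kids disc
    obtain ⟨nb, node⟩ := p
    have hlen : (((nb, node) :: q').length + f) = (q'.length + f) + 1 := by simp; omega
    rw [hlen]
    show ((nb, node) ::
      bfsLoopA adj (q'.length + f) ((q' ++ kids) ++ _) (PySem.Set.update disc _)) = _
    rw [List.append_assoc]
    rw [ih]
    simp [aStep, List.foldl_cons]

theorem bfsLoopA_nil (adj : PySem.Dict Int (List Int)) (f : Nat) (disc : PySem.Set Int) :
    bfsLoopA adj f [] disc = [] := by cases f <;> rfl

theorem bfsLoopB_nil (matrix : List (List Int)) (f : Nat) (disc : PySem.Set Int) :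
    bfsLoopB matrix f [] disc = [] := by cases f <;> rfl

-- potential: how many possible neighbour indices are still undiscovered
def idxList (matrix : List (List Int)) : List Int :=
  (List.range ((matrix.map List.length).foldr max 0)).map Int.ofNat

def pot (matrix : List (List Int)) (disc : PySem.Set Int) : Nat :=
  (idxList matrix).countP (fun i => !PySem.Set.contains disc i)

theorem nodup_idxList (matrix : List (List Int)) : (idxList matrix).Nodup := by
  unfold idxList
  exact List.Nodup.map (fun a b h => Int.ofNat.inj h) List.nodup_range

theorem countP_and_split {α : Type} (l : List α) (p q : α → Bool) :
    l.countP p = l.countP (fun x => p x && q x) + l.countP (fun x => p x && !q x) := by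
  induction l with
  | nil => simp
  | cons x xs ih =>
    simp only [List.countP_cons, ih]
    cases hp : p x <;> cases hq : q x <;> simp <;> omega

theorem pot_update (matrix : List (List Int)) (disc : PySem.Set Int) (ks : List Int)
    (hnd : ks.Nodup) (hdisj : ∀ x ∈ ks, x ∉ disc) (hsub : ∀ x ∈ ks, x ∈ idxList matrix) :
    pot matrix (PySem.Set.update disc ks) + ks.length = pot matrix disc := by
  unfold pot
  have hc : ∀ i, (!PySem.Set.contains (PySem.Set.update disc ks) i)
      = ((!PySem.Set.contains disc i) && !decide (i ∈ ks)) := by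
    intro i
    have h1 : PySem.Set.contains (PySem.Set.update disc ks) i
        = (decide (i ∈ disc) || decide (i ∈ ks)) := by
      rw [Bool.eq_iff_iff]
      simp [PySem.Set.mem_update]
    have h2 : PySem.Set.contains disc i = decide (i ∈ disc) := by
      rw [Bool.eq_iff_iff]
      simp
    rw [h1, h2, Bool.not_or]
  simp only [hc]
  rw [countP_and_split (idxList matrix) (fun i => !PySem.Set.contains disc i) (fun i => decide (i ∈ ks))]
  have hcong : (idxList matrix).countP
      (fun i => (!PySem.Set.contains disc i) && decide (i ∈ ks))
      = (idxList matrix).countP (fun i => decide (i ∈ ks)) := by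
    apply List.countP_congr
    intro x hx
    by_cases hk : x ∈ ks
    · have hnd2 : x ∉ disc := hdisj x hk
      have : PySem.Set.contains disc x = false := by
        rw [Bool.eq_false_iff]
        intro hcc
        exact hnd2 ((PySem.Set.contains_iff disc x).mp hcc)
      simp [hk, hnd2]
    · simp [hk]
  have hlen : (idxList matrix).countP (fun i => decide (i ∈ ks)) = ks.length := by
    rw [List.countP_eq_length_filter]
    have hperm : List.Perm ((idxList matrix).filter (fun i => decide (i ∈ ks))) ks := by
      rw [List.perm_ext_iff_of_nodup ((nodup_idxList matrix).filter _) hnd]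
      intro a
      simp only [List.mem_filter, decide_eq_true_eq]
      constructor
      · exact fun h => h.2
      · exact fun h => ⟨hsub a h, h⟩
    exact hperm.length_eq
  omega

theorem le_foldr_max (l : List Nat) (a : Nat) (h : a ∈ l) : a ≤ l.foldr max 0 := by
  induction l with
  | nil => cases h
  | cons x xs ih =>
    rcases List.mem_cons.mp h with rfl | h'
    · exact Nat.le_max_left _ _
    · exact le_trans (ih h') (Nat.le_max_right _ _)

theorem foldr_max_le_sum (l : List Nat) : l.foldr max 0 ≤ l.sum := by
  induction l with
  | nil => simp
  | cons x xs ih =>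
    simp only [List.foldr_cons, List.sum_cons]
    exact Nat.max_le.mpr ⟨Nat.le_add_right _ _, le_trans ih (Nat.le_add_left _ _)⟩

-- expanding a level preserves (frontier length + potential)
theorem fold_pot (matrix : List (List Int)) :
    ∀ (q : List (Int × Int)) (st : List (Int × Int) × PySem.Set Int),
    (q.foldl (aStep (adjMatrixToAdjList matrix)) st).1.length
      + pot matrix (q.foldl (aStep (adjMatrixToAdjList matrix)) st).2
    = st.1.length + pot matrix st.2 := by
  intro q
  induction q with
  | nil => intro st; rfl
  | cons p q' ih =>
    intro st
    rw [List.foldl_cons, ih]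
    have hstep : (aStep (adjMatrixToAdjList matrix) st p).1.length
        + pot matrix (aStep (adjMatrixToAdjList matrix) st p).2
        = st.1.length + pot matrix st.2 := by
      unfold aStep
      simp only [List.length_append, List.length_map]
      have hks := pot_update matrix st.2
        (PySem.Set.diff (PySem.Set.ofList (PySem.Dict.getD (adjMatrixToAdjList matrix) p.2 [])) st.2)
        (PySem.Set.nodup_diff _ _ (PySem.Set.nodup_ofList _))
        (fun x hx => ((PySem.Set.mem_diff _ _ _).mp hx).2)
        (fun x hx => by
          have hx1 := ((PySem.Set.mem_diff _ _ _).mp hx).1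
          rw [PySem.Set.mem_ofList] at hx1
          rw [adj_getD] at hx1
          by_cases hg : 0 ≤ p.2 ∧ p.2 < PySem.List.len matrix
          · rw [if_pos hg] at hx1
            have hb := mem_rowNbrs _ _ hx1
            have hrowmem : PySem.List.pyGetD matrix p.2 [] ∈ matrix := by
              have hlen : PySem.List.len matrix = (matrix.length : Int) := by
                simp [PySem.List.len]
              have hlt : p.2.toNat < matrix.length := by
                rw [hlen] at hg; omega
              rw [PySem.List.pyGetD_of_nonneg matrix [] hg.1]
              rw [List.getD_eq_getElem _ _ hlt]
              exact List.getElem_mem hlt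
            have hle : (PySem.List.pyGetD matrix p.2 []).length
                ≤ (matrix.map List.length).foldr max 0 :=
              le_foldr_max _ _ (List.mem_map_of_mem hrowmem)
            unfold idxList
            rw [List.mem_map]
            exact ⟨x.toNat, by rw [List.mem_range]; omega, by simp only [Int.ofNat_eq_natCast]; omega⟩
          · rw [if_neg hg] at hx1
            exact absurd hx1 (List.not_mem_nil))
      omega
    omega

-- the two loops agree whenever both fuels are large enough
theorem loops_eq (matrix : List (List Int)) :
    ∀ (L F : Nat) (q : List (Int × Int)) (disc : PySem.Set Int),
    pot matrix disc + 1 ≤ L → q.length + pot matrix disc + 1 ≤ F →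
    bfsLoopA (adjMatrixToAdjList matrix) F q disc = bfsLoopB matrix L q disc := by
  intro L
  induction L with
  | zero => intro F q disc h1 h2; omega
  | succ L ih =>
    intro F q disc h1 h2
    match q with
    | [] => rw [bfsLoopA_nil, bfsLoopB_nil]
    | x :: rest =>
      have hF : F = (x :: rest).length + (F - (x :: rest).length) := by
        simp at h2 ⊢; omega
      rw [hF]
      have hA := A_level (adjMatrixToAdjList matrix) (x :: rest) (F - (x :: rest).length) [] disc
      rw [List.append_nil] at hA
      rw [hA]
      rw [step_eq]
      show _ = (x :: rest) ++ bfsLoopB matrix L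
        ((x :: rest).foldl (bStep matrix) ([], disc)).1
        ((x :: rest).foldl (bStep matrix) ([], disc)).2
      congr 1
      have hpot := fold_pot matrix (x :: rest) ([], disc)
      rw [step_eq] at hpot
      simp only [List.length_nil, Nat.zero_add] at hpot
      cases hE : ((x :: rest).foldl (bStep matrix) ([], disc)).1 with
      | nil =>
        rw [bfsLoopA_nil, bfsLoopB_nil]
      | cons y ys =>
        rw [← hE]
        have hf : ((x :: rest).foldl (bStep matrix) ([], disc)).1.length = ys.length + 1 := by
          rw [hE]; simp
        apply ih
        · omega
        · simp only [List.length_cons] at h2 hF ⊢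
          omega

-- ===== VERDICT (by name: the statement is the Claim_ definition above) =====
theorem bfsToFindSortPath_spec : Claim_equal_bfsToFindSortPath := by
  intro matrix startNode _ _
  unfold Spec_bfsToFindSortPath bfsToFindSortPath bfsToFindSortPath_alt
  apply loops_eq
  · have h1 : pot matrix (PySem.Set.ofList [startNode]) ≤ (idxList matrix).length :=
      List.countP_le_length
    have h2 : (idxList matrix).length = (matrix.map List.length).foldr max 0 := by
      simp [idxList]
    have h3 : (matrix.map List.length).foldr max 0 ≤ (matrix.map List.length).sum :=
      foldr_max_le_sum _
    omega
  · have h1 : pot matrix (PySem.Set.ofList [startNode]) ≤ (idxList matrix).length :=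
      List.countP_le_length
    have h2 : (idxList matrix).length = (matrix.map List.length).foldr max 0 := by
      simp [idxList]
    have h3 : (matrix.map List.length).foldr max 0 ≤ (matrix.map List.length).sum :=
      foldr_max_le_sum _
    simp
    omega
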